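-- pv_equiv track=rewrite | github.com/miguelsantos42/FPRO | FPRO22_23/Testes/Teste modelos/Teste Modelo 2_1 resolução/ex2.py | is_pair_of_square
-- ===== SOURCE A (Python) =====
-- def is_pair_of_square(number_one, number_two):
--     if number_one == number_two:
--         return False
--
--     square_one = number_one * number_one
--     square_two = number_two * number_two
--
--     aux = square_two
--     final_aux = 0
--     while aux != 0:
--         d = aux % 10
--         final_aux = final_aux * 10 + d
--         aux = aux // 10
--
--     if square_one == final_aux:
--         return True
--     else:
--         return False
-- ===== SOURCE B (Python) =====
-- def is_pair_of_square(number_one, number_two):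
--     if number_one == number_two:
--         return False
--     square_one = number_one * number_one
--     square_two = number_two * number_two
--     reversed_str = str(square_two)[::-1].lstrip('0') or '0'
--     return str(square_one) == reversed_str
-- ===== Notes on version B (the rewrite author's own statement) =====
-- stated objective: idiomatic
-- what changed: The arithmetic modulo/division digit-reversal loop is replaced by string slicing: the reversed square is obtained as str(square_two)[::-1] with leading zeros stripped (or '0'), and compared with str(square_one); no loop and no arithmetic digit extraction remain.
import Mathlib
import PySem

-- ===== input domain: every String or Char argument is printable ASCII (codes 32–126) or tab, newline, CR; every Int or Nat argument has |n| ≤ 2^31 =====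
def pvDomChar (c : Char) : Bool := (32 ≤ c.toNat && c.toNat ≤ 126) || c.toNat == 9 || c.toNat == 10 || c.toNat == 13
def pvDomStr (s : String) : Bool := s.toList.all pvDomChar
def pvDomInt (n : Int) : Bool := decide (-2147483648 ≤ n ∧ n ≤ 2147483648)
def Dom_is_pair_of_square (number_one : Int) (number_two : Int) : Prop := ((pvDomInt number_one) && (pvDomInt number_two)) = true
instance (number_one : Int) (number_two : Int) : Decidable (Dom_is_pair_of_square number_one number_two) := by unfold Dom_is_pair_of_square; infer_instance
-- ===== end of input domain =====

-- B replaces A's arithmetic modulo/division digit-reversal loop by a string reversal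
-- (str(square_two)[::-1], leading zeros stripped, or '0') compared with str(square_one); objective: idiomatic.

-- ===== PORT A =====
-- the `while aux != 0` loop; aux is a square, hence nonnegative, so the Nat-valued
-- state is exact (Python's % and // on nonnegative ints agree with Nat.mod / Nat.div)
def revLoop : Nat → Int → Int
  | 0, final_aux => final_aux
  | (aux + 1), final_aux =>
      revLoop ((aux + 1) / 10) (final_aux * 10 + (((aux + 1) % 10 : Nat) : Int))
decreasing_by exact Nat.div_lt_self (Nat.succ_pos _) (by norm_num)

def is_pair_of_square (number_one : Int) (number_two : Int) : Bool :=
  if number_one == number_two then false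
  else
    let square_one := number_one * number_one
    let square_two := number_two * number_two
    let final_aux := revLoop square_two.toNat 0
    if square_one == final_aux then true else false

-- ===== PORT B =====
def is_pair_of_square_alt (number_one : Int) (number_two : Int) : Bool :=
  if number_one == number_two then false
  else
    let square_one := number_one * number_one
    let square_two := number_two * number_two
    -- str(square_two)[::-1]  : reversal of the decimal string (PySem.Str.slice?_none_none_neg_one: s[::-1] is reverse)
    -- .lstrip('0')           : ported by hand as dropWhile (· == '0') — exact for a single-char chars argument
    let stripped := ((PySem.Int.toChars square_two).reverse).dropWhile (· == '0')
    -- `or '0'` : the empty string is falsy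
    let reversed_str := if stripped.isEmpty then ['0'] else stripped
    PySem.Int.toChars square_one == reversed_str

-- ===== PRECONDITION & SPEC =====
def Spec_is_pair_of_square (number_one : Int) (number_two : Int) (out : Bool) : Prop := out = is_pair_of_square_alt number_one number_two
instance (number_one : Int) (number_two : Int) (out : Bool) : Decidable (Spec_is_pair_of_square number_one number_two out) := by unfold Spec_is_pair_of_square; infer_instance

-- ===== CLAIM (what is proved, stated in full; the proofs are below) =====
def Claim_equal_is_pair_of_square : Prop := ∀ (number_one : Int) (number_two : Int), Dom_is_pair_of_square number_one number_two → Spec_is_pair_of_square number_one number_two (is_pair_of_square number_one number_two)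

-- ===== LEMMAS AND PROOFS =====

-- digitChar is injective on decimal digits, and hits '0' only at 0
lemma digitChar_inj : ∀ a < 10, ∀ b < 10, Nat.digitChar a = Nat.digitChar b → a = b := by decide

lemma digitChar_eq_zeroChar : ∀ a < 10, ((Nat.digitChar a == '0') = (a == 0)) := by decide

-- toDigitsCore, given enough fuel, is the reversed digit list rendered with digitChar
lemma toDigitsCore_eq (fuel : Nat) : ∀ n acc, 0 < n → n < 10 ^ fuel →
    Nat.toDigitsCore 10 fuel n acc = ((Nat.digits 10 n).map Nat.digitChar).reverse ++ acc := by
  induction fuel with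
  | zero => intro n acc hn hlt; omega
  | succ fuel ih =>
    intro n acc hn hlt
    rw [Nat.toDigitsCore]
    rw [Nat.digits_def' (by norm_num : (1:Nat) < 10) hn]
    by_cases h : n / 10 = 0
    · simp [h]
    · have hq : 0 < n / 10 := Nat.pos_of_ne_zero h
      have hql : n / 10 < 10 ^ fuel := by
        rw [Nat.div_lt_iff_lt_mul (by norm_num)]
        calc n < 10 ^ (fuel + 1) := hlt
          _ = 10 ^ fuel * 10 := by ring
      simp only [if_neg h]
      rw [ih (n / 10) _ hq hql]
      simp

lemma toDigits_eq (n : Nat) :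
    Nat.toDigits 10 n = if n = 0 then ['0'] else ((Nat.digits 10 n).map Nat.digitChar).reverse := by
  by_cases h : n = 0
  · subst h; rfl
  · have hfuel : n < 10 ^ (n + 1) :=
      lt_of_lt_of_le (Nat.lt_pow_self (by norm_num))
        (Nat.pow_le_pow_right (by norm_num) (Nat.le_succ n))
    rw [Nat.toDigits, toDigitsCore_eq (n + 1) n [] (Nat.pos_of_ne_zero h) hfuel]
    simp [h]

lemma toChars_natCast (m : Nat) : PySem.Int.toChars (m : Int) = Nat.toDigits 10 m := by
  simp [PySem.Int.toChars]

-- str never renders a positive number as "0"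
lemma toDigits_ne_zero_chars (n : Nat) (hn : 0 < n) :
    ((Nat.digits 10 n).map Nat.digitChar).reverse ≠ ['0'] := by
  intro h
  have h2 : (Nat.digits 10 n).map Nat.digitChar = ['0'] := by
    have := congrArg List.reverse h
    simpa using this
  match hd : Nat.digits 10 n with
  | [] => rw [hd] at h2; simp at h2
  | [d] =>
    rw [hd] at h2
    simp at h2
    have hdlt : d < 10 := Nat.digits_lt_base (by norm_num) (hd ▸ List.mem_singleton_self d)
    have hd0 : d = 0 := digitChar_inj d hdlt 0 (by norm_num) (by simpa using h2)
    have hv : n = Nat.ofDigits 10 (Nat.digits 10 n) := (Nat.ofDigits_digits 10 n).symm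
    rw [hd, hd0] at hv
    simp [Nat.ofDigits_singleton] at hv
    omega
  | d :: e :: t => rw [hd] at h2; simp at h2

lemma map_digitChar_inj (l1 : List Nat) : ∀ l2 : List Nat, (∀ d ∈ l1, d < 10) → (∀ d ∈ l2, d < 10) →
    l1.map Nat.digitChar = l2.map Nat.digitChar → l1 = l2 := by
  induction l1 with
  | nil => intro l2 _ _ h; cases l2 <;> simp_all
  | cons a t ih =>
    intro l2 h1 h2 h
    cases l2 with
    | nil => simp_all
    | cons b t2 =>
      simp only [List.map_cons, List.cons.injEq] at h
      have ha := h1 a (by simp)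
      have hb := h2 b (by simp)
      exact List.cons_eq_cons.mpr ⟨digitChar_inj a ha b hb h.1,
        ih t2 (fun d hd => h1 d (by simp [hd])) (fun d hd => h2 d (by simp [hd])) h.2⟩

-- str is injective on naturals
lemma toDigits_inj (a b : Nat) (h : Nat.toDigits 10 a = Nat.toDigits 10 b) : a = b := by
  rw [toDigits_eq, toDigits_eq] at h
  by_cases ha : a = 0 <;> by_cases hb : b = 0
  · omega
  · exfalso; rw [if_pos ha, if_neg hb] at h
    exact toDigits_ne_zero_chars b (Nat.pos_of_ne_zero hb) h.symm
  · exfalso; rw [if_neg ha, if_pos hb] at h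
    exact toDigits_ne_zero_chars a (Nat.pos_of_ne_zero ha) h
  · rw [if_neg ha, if_neg hb] at h
    have h2 : (Nat.digits 10 a).map Nat.digitChar = (Nat.digits 10 b).map Nat.digitChar := by
      have := congrArg List.reverse h; simpa using this
    have hd : Nat.digits 10 a = Nat.digits 10 b :=
      map_digitChar_inj _ _ (fun d hd => Nat.digits_lt_base (by norm_num) hd)
        (fun d hd => Nat.digits_lt_base (by norm_num) hd) h2
    have := congrArg (Nat.ofDigits 10) hd
    simpa [Nat.ofDigits_digits] using this

-- A's loop is a fold over the (little-endian) decimal digits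
lemma revLoop_eq_foldl (m : Nat) : ∀ f : Int,
    revLoop m f = List.foldl (fun (a : Int) (d : Nat) => a * 10 + (d : Int)) f (Nat.digits 10 m) := by
  induction m using Nat.strong_induction_on with
  | _ m ih =>
    intro f
    match m with
    | 0 => simp [revLoop]
    | (k + 1) =>
      rw [revLoop, Nat.digits_def' (by norm_num : (1:Nat) < 10) (Nat.succ_pos k)]
      rw [ih ((k + 1) / 10) (Nat.div_lt_self (Nat.succ_pos k) (by norm_num))]
      simp

lemma foldl_rev_eq (D : List Nat) : ∀ f : Int,
    List.foldl (fun (a : Int) (d : Nat) => a * 10 + (d : Int)) f D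
      = f * 10 ^ D.length + ((Nat.ofDigits 10 D.reverse : Nat) : Int) := by
  induction D with
  | nil => intro f; simp [Nat.ofDigits_nil]
  | cons d T ih =>
    intro f
    rw [List.foldl_cons, ih, Nat.ofDigits_reverse_cons]
    push_cast
    simp [List.length_cons]
    ring

-- ofDigits ignores an all-zero high-digit suffix
lemma ofDigits_all_zero (Z : List Nat) (h : ∀ d ∈ Z, d = 0) : Nat.ofDigits 10 Z = 0 := by
  induction Z with
  | nil => simp
  | cons a t ih =>
    have ha := h a (by simp)
    simp [Nat.ofDigits_cons, ha, ih (fun d hd => h d (by simp [hd]))]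

-- dropping the leading zeros of the reversed string does not change the parsed value
lemma ofDigits_dropWhile (L : List Nat) :
    Nat.ofDigits 10 L.reverse = Nat.ofDigits 10 (L.dropWhile (· == 0)).reverse := by
  conv_lhs => rw [← List.takeWhile_append_dropWhile (p := (· == 0)) (l := L)]
  rw [List.reverse_append, Nat.ofDigits_append]
  rw [ofDigits_all_zero (L.takeWhile (· == 0)).reverse
    (fun d hd => by simpa using List.mem_takeWhile_imp (List.mem_reverse.mp hd))]
  simp

-- pointwise-equal predicates drop the same prefix
lemma dropWhile_congr_mem {α : Type} (p q : α → Bool) : ∀ l : List α,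
    (∀ x ∈ l, p x = q x) → l.dropWhile p = l.dropWhile q := by
  intro l
  induction l with
  | nil => intro _; simp
  | cons a t ih =>
    intro h
    rw [List.dropWhile_cons, List.dropWhile_cons, h a (by simp)]
    by_cases hq : q a = true
    · rw [if_pos hq, if_pos hq, ih (fun x hx => h x (by simp [hx]))]
    · rw [if_neg hq, if_neg hq]

-- the character-level strip is the digit-level strip
lemma strip_chars_eq (m : Nat) :
    ((PySem.Int.toChars (m : Int)).reverse).dropWhile (· == '0')
      = ((Nat.digits 10 m).dropWhile (· == 0)).map Nat.digitChar := by
  by_cases h : m = 0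
  · subst h
    rw [toChars_natCast, toDigits_eq]
    simp [List.dropWhile]
  · rw [toChars_natCast, toDigits_eq, if_neg h, List.reverse_reverse]
    rw [List.dropWhile_map]
    congr 1
    exact dropWhile_congr_mem _ (· == 0) (Nat.digits 10 m)
      (fun d hd => by
        simpa [Function.comp] using digitChar_eq_zeroChar d (Nat.digits_lt_base (by norm_num) hd))

-- the digits of the reversed value are exactly the stripped reversed digits
lemma digits_rev_value (m : Nat) :
    Nat.digits 10 (Nat.ofDigits 10 ((Nat.digits 10 m).dropWhile (· == 0)).reverse)
      = ((Nat.digits 10 m).dropWhile (· == 0)).reverse := by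
  set T := (Nat.digits 10 m).dropWhile (· == 0) with hT
  by_cases hTe : T = []
  · simp [hTe]
  · apply Nat.digits_ofDigits 10 (by norm_num)
    · intro d hd
      exact Nat.digits_lt_base (by norm_num)
        ((List.dropWhile_sublist (· == 0)).subset (hT ▸ List.mem_reverse.mp hd))
    · intro hne
      have hh := List.head_dropWhile_not (· == 0) (l := Nat.digits 10 m)
        (by simpa [hT] using hTe)
      rw [List.getLast_reverse]
      simpa [hT] using hh

-- B's comparison string is exactly str of A's reversed value
lemma reversed_str_eq (m : Nat) :
    (if ((((PySem.Int.toChars (m : Int)).reverse).dropWhile (· == '0')).isEmpty) then ['0']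
     else ((PySem.Int.toChars (m : Int)).reverse).dropWhile (· == '0'))
      = Nat.toDigits 10 (Nat.ofDigits 10 ((Nat.digits 10 m).dropWhile (· == 0)).reverse) := by
  rw [strip_chars_eq]
  set T := (Nat.digits 10 m).dropWhile (· == 0) with hT
  by_cases hTe : T = []
  · rw [hTe]; simp [Nat.toDigits]; rfl
  · have hne : T.map Nat.digitChar ≠ [] := by simp [hTe]
    rw [if_neg (by simpa [List.isEmpty_iff] using hne)]
    have hv : Nat.ofDigits 10 T.reverse ≠ 0 := by
      intro h0
      have hdig := digits_rev_value m
      rw [← hT, h0] at hdig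
      simp at hdig
      exact hTe (by simpa using congrArg List.reverse hdig.symm)
    rw [toDigits_eq, if_neg hv, digits_rev_value m, ← hT]
    simp

-- the two ports agree on every pair of integers
lemma ports_agree (number_one number_two : Int) :
    is_pair_of_square number_one number_two = is_pair_of_square_alt number_one number_two := by
  unfold is_pair_of_square is_pair_of_square_alt
  by_cases heq : number_one = number_two
  · simp [heq]
  · have hbeq : (number_one == number_two) = false := by simpa using heq
    simp only [hbeq, Bool.false_eq_true, if_false]
    obtain ⟨a, ha⟩ : ∃ a : Nat, number_one * number_one = (a : Int) :=
      ⟨(number_one * number_one).toNat, (Int.toNat_of_nonneg (mul_self_nonneg _)).symm⟩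
    obtain ⟨b, hb⟩ : ∃ b : Nat, number_two * number_two = (b : Int) :=
      ⟨(number_two * number_two).toNat, (Int.toNat_of_nonneg (mul_self_nonneg _)).symm⟩
    rw [ha, hb, Int.toNat_natCast]
    have hA : revLoop b 0
        = ((Nat.ofDigits 10 ((Nat.digits 10 b).dropWhile (· == 0)).reverse : Nat) : Int) := by
      rw [revLoop_eq_foldl, foldl_rev_eq, ofDigits_dropWhile]
      simp
    rw [hA, reversed_str_eq b, toChars_natCast a]
    by_cases hv : a = Nat.ofDigits 10 ((Nat.digits 10 b).dropWhile (· == 0)).reverse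
    · simp [hv]
    · have hx : ¬ ((a : Int) = ((Nat.ofDigits 10 ((Nat.digits 10 b).dropWhile (· == 0)).reverse : Nat) : Int)) := by
        exact_mod_cast hv
      have ht : Nat.toDigits 10 a
          ≠ Nat.toDigits 10 (Nat.ofDigits 10 ((Nat.digits 10 b).dropWhile (· == 0)).reverse) :=
        fun h => hv (toDigits_inj _ _ h)
      simp [hx, ht]

-- ===== VERDICT (by name: the statement is the Claim_ definition above) =====
theorem is_pair_of_square_spec : Claim_equal_is_pair_of_square := by
  intro number_one number_two _
  unfold Spec_is_pair_of_square
  exact ports_agree number_one number_two
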